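-- pv_equiv track=rewrite | github.com/reydus/ac2019 | day 4/main.py | doubleFind
-- ===== SOURCE A (Python) =====
-- def doubleFind(series):
--     filtered = []
--     for i in series:
--         i = str(i)
--         for k in range(0, len(i)-1):
--             if i[k] == i[k+1]:
--                 filtered.append(int(i))
--                 break
--     return filtered
-- ===== SOURCE B (Python) =====
-- def doubleFind(series):
--     out = []
--     for i in series:
--         s = str(i)
--         collapsed = []
--         for c in s:
--             if not collapsed or collapsed[-1] != c:
--                 collapsed.append(c)
--         if len(collapsed) != len(s):
--             out.append(int(s))
--     return out
-- ===== Notes on version B (the rewrite author's own statement) =====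
-- stated objective: alternative
-- what changed: B replaces A's index-based adjacent-pair scan with break by a run-length collapse: it builds the consecutive-duplicate-collapsed stack of each string and appends int(s) exactly when collapsing shortened it (collapsed length != len(s)).
import Mathlib
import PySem

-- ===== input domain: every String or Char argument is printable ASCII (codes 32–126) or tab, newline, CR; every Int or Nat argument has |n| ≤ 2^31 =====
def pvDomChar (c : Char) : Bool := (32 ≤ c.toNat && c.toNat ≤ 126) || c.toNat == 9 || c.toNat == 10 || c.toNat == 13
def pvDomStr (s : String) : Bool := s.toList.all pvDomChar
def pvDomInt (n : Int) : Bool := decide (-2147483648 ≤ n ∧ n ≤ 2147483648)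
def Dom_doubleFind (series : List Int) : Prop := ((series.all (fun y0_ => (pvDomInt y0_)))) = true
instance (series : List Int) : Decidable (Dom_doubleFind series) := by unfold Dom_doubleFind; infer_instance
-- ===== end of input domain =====

-- B replaces A's index scan with break by a run-length collapse: it builds the
-- consecutive-duplicate-collapsed stack and tests whether collapsing shortened the string.

-- ===== PORT A =====
-- inner 'for k in range(0, len(i)-1): if i[k]==i[k+1]: ... break': scans the index
-- list, returns true at the first adjacent-equal pair (the break), else false.
def doubleFindScan (s : List Char) : List Int → Bool
  | [] => false
  | k :: rest =>
    if PySem.List.pyGetD s k ' ' == PySem.List.pyGetD s (k + 1) ' ' then true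
    else doubleFindScan s rest

-- int(s) where s = str(i): ofChars? never returns none on str output, .getD 0 only totalizes
def doubleFind (series : List Int) : List Int :=
  series.foldl
    (fun filtered i =>
      let s := PySem.Int.toChars i
      if doubleFindScan s (PySem.List.pyRange 0 (PySem.List.len s - 1) 1) then
        filtered ++ [(PySem.Int.ofChars? s).getD 0]
      else filtered)
    []

-- ===== PORT B =====
-- 'if not collapsed or collapsed[-1] != c: collapsed.append(c)'
-- (collapsed[-1] is only reached on nonempty collapsed; pyGet? -1 is exact there)
def doubleFindPush (collapsed : List Char) (c : Char) : List Char :=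
  if collapsed.isEmpty || !(PySem.List.pyGet? collapsed (-1) == some c) then
    collapsed ++ [c]
  else collapsed

def doubleFind_alt (series : List Int) : List Int :=
  series.foldl
    (fun out i =>
      let s := PySem.Int.toChars i
      let collapsed := s.foldl doubleFindPush []
      if !(PySem.List.len collapsed == PySem.List.len s) then
        out ++ [(PySem.Int.ofChars? s).getD 0]
      else out)
    []

-- ===== PRECONDITION & SPEC =====
def Spec_doubleFind (series : List Int) (out : List Int) : Prop := out = doubleFind_alt series
instance (series : List Int) (out : List Int) : Decidable (Spec_doubleFind series out) := by unfold Spec_doubleFind; infer_instance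

-- ===== CLAIM (what is proved, stated in full; the proofs are below) =====
def Claim_equal_doubleFind : Prop := ∀ (series : List Int), Dom_doubleFind series → Spec_doubleFind series (doubleFind series)

-- ===== LEMMAS AND PROOFS =====

-- A's scan over an explicit index list is 'any' of the pairwise test
lemma doubleFindScan_eq_any (s : List Char) (ks : List Int) :
    doubleFindScan s ks
      = ks.any (fun k => PySem.List.pyGetD s k ' ' == PySem.List.pyGetD s (k + 1) ' ') := by
  induction ks with
  | nil => rfl
  | cons k rest ih =>
    simp only [doubleFindScan, List.any_cons]
    split_ifs with h <;> simp [h, ih]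

-- proof-side pairwise-adjacent test
def adjChk : List Char → Bool
  | a :: b :: t => a == b || adjChk (b :: t)
  | _ => false

-- the natural-index version of the pairwise test equals the zip-free adjChk
lemma range_any_eq_adjChk (s : List Char) :
    (List.range (s.length - 1)).any
        (fun k => s.getD k ' ' == s.getD (k + 1) ' ')
      = adjChk s := by
  induction s with
  | nil => rfl
  | cons a t ih =>
    cases t with
    | nil => rfl
    | cons b u =>
      simp only [List.length_cons, Nat.add_sub_cancel] at ih ⊢
      rw [List.range_succ_eq_map, List.any_cons, List.any_map]
      simp only [adjChk, Function.comp_def, List.getD_cons_succ, List.getD_cons_zero, ← ih]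

-- per element: A's loop condition equals adjChk
lemma scan_eq_adjChk (s : List Char) :
    doubleFindScan s (PySem.List.pyRange 0 (PySem.List.len s - 1) 1) = adjChk s := by
  match s with
  | [] => rfl
  | c :: t =>
  rw [doubleFindScan_eq_any]
  set s := c :: t with hs
  have hlen : PySem.List.len s - 1 = ((s.length - 1 : Nat) : Int) := by
    rw [PySem.List.len_eq, hs]
    simp only [List.length_cons]
    omega
  have hfun : (fun k : Nat =>
        PySem.List.pyGetD s (↑k) ' ' == PySem.List.pyGetD s (↑k + 1) ' ')
      = (fun k : Nat => s.getD k ' ' == s.getD (k + 1) ' ') := by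
    funext k
    have h1 : ((k : Int) + 1) = ((k + 1 : Nat) : Int) := by push_cast; ring
    rw [h1, PySem.List.pyGetD_natCast, PySem.List.pyGetD_natCast]
  rw [hlen, PySem.List.pyRange_zero_natCast, List.any_map, ← range_any_eq_adjChk s]
  simp only [Function.comp_def]
  rw [hfun]

-- adjChk is the negation of the no-two-adjacent-equal chain condition
lemma adjChk_eq_not_chain (s : List Char) :
    adjChk s = !decide (s.IsChain (· ≠ ·)) := by
  induction s with
  | nil => simp [adjChk]
  | cons a t ih =>
    cases t with
    | nil => simp [adjChk]
    | cons b u =>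
      simp only [adjChk, ih, List.isChain_cons_cons]
      by_cases hab : a = b <;> simp [hab]

-- head of destutter' R c t is c
lemma destutter'_head_cons (c : Char) (t : List Char) :
    List.destutter' (· ≠ ·) c t = c :: (List.destutter' (· ≠ ·) c t).tail := by
  induction t generalizing c with
  | nil => rfl
  | cons b u ih =>
    by_cases h : c = b
    · rw [List.destutter'_cons_neg _ (not_not_intro h)]
      exact ih c
    · rw [List.destutter'_cons_pos _ h]
      rfl

-- B's fold-with-push is destutter' on the tail, once the stack is nonempty
lemma foldPush_eq_destutter' (s : List Char) :
    ∀ (acc : List Char) (x : Char), acc.getLast? = some x →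
      s.foldl doubleFindPush acc = acc ++ (s.destutter' (· ≠ ·) x).tail := by
  induction s with
  | nil => intro acc x _; simp
  | cons c t ih =>
    intro acc x hlast
    have hne : acc ≠ [] := by intro h; simp [h] at hlast
    have hget : PySem.List.pyGet? acc (-1) = some x := by
      rw [PySem.List.pyGet?_neg_one, hlast]
    by_cases hxc : x = c
    · have hstep : doubleFindPush acc c = acc := by
        simp [doubleFindPush, hne, hget, hxc]
      rw [List.foldl_cons, hstep, ih acc x hlast,
        List.destutter'_cons_neg _ (not_not_intro hxc)]
    · have hstep : doubleFindPush acc c = acc ++ [c] := by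
        simp [doubleFindPush, hget, hxc]
      rw [List.foldl_cons, hstep,
        ih (acc ++ [c]) c (by simp),
        List.destutter'_cons_pos _ hxc, List.tail_cons,
        destutter'_head_cons c t]
      simp

-- B's collapsed stack is exactly destutter (consecutive-duplicate removal)
lemma foldPush_eq_destutter (s : List Char) :
    s.foldl doubleFindPush [] = s.destutter (· ≠ ·) := by
  cases s with
  | nil => rfl
  | cons c t =>
    have h1 : doubleFindPush [] c = [c] := by simp [doubleFindPush]
    rw [List.foldl_cons, h1, foldPush_eq_destutter' t [c] c (by simp),
      List.destutter_cons', destutter'_head_cons c t]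
    rfl

-- collapsing shortened the string iff some adjacent pair is equal
lemma collapsed_len_ne_iff (s : List Char) :
    (!(PySem.List.len (s.foldl doubleFindPush []) == PySem.List.len s))
      = adjChk s := by
  rw [foldPush_eq_destutter, adjChk_eq_not_chain]
  simp only [PySem.List.len_eq]
  have hsub := List.destutter_sublist (R := (· ≠ ·)) s
  by_cases hc : s.IsChain (· ≠ ·)
  · rw [List.destutter_of_isChain _ s hc]
    simp [hc]
  · have hne : s.destutter (· ≠ ·) ≠ s := by
      intro h; exact hc ((List.destutter_eq_self_iff _ s).mp h)
    have hlt : (s.destutter (· ≠ ·)).length ≠ s.length := by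
      intro h; exact hne (hsub.eq_of_length h)
    simp [hc, hlt]

-- ===== VERDICT (by name: the statement is the Claim_ definition above) =====
theorem doubleFind_spec : Claim_equal_doubleFind := by
  intro series _
  unfold Spec_doubleFind doubleFind doubleFind_alt
  congr 1
  funext acc i
  simp only [scan_eq_adjChk, collapsed_len_ne_iff]
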